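-- pv_equiv track=rewrite | github.com/gowrysailajav/learn_as_you_go | Testing/s0.2.2_population_without_elevation_testig.py | find_neighbors_updated
-- ===== SOURCE A (Python) =====
-- def find_neighbors_updated(x, y, min_val, max_val):
--     zero_hop = [(x, y)]
--     one_hop = []
--     two_hop = []
--     three_hop = []
--
--     for dx in [-1, 0, 1]:
--         for dy in [-1, 0, 1]:
--             if dx == 0 and dy == 0:
--                 continue  # skip the given cell itself
--             nx = x + dx
--             ny = y + dy
--             if nx < min_val or nx >= max_val or ny < min_val or ny >= max_val:
--                 continue  # skip out-of-bounds cells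
--             one_hop.append((nx, ny))
--
--             for dx2 in [-1, 0, 1]:
--                 for dy2 in [-1, 0, 1]:
--                     if dx2 == 0 and dy2 == 0:
--                         continue  # skip the given cell itself
--                     nx2 = nx + dx2
--                     ny2 = ny + dy2
--                     if nx2 < min_val or nx2 >= max_val or ny2 < min_val or ny2 >= max_val:
--                         continue  # skip out-of-bounds cells
--                     two_hop.append((nx2, ny2))
--
--                     for dx3 in [-1, 0, 1]:
--                         for dy3 in [-1, 0, 1]:
--                             if dx3 == 0 and dy3 == 0:
--                                 continue  # skip the given cell itself
--                             nx3 = nx2 + dx3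
--                             ny3 = ny2 + dy3
--                             if nx3 < min_val or nx3 >= max_val or ny3 < min_val or ny3 >= max_val:
--                                 continue  # skip out-of-bounds cells
--                             three_hop.append((nx3, ny3))
--
--     return (zero_hop, one_hop, two_hop, three_hop)
-- ===== SOURCE B (Python) =====
-- OFFSETS = [(-1, -1), (-1, 0), (-1, 1), (0, -1), (0, 1), (1, -1), (1, 0), (1, 1)]
--
--
-- def find_neighbors_updated(x, y, min_val, max_val):
--     # Breadth-first worklist: one loop over a FIFO queue of (cell, depth) items
--     # instead of three levels of nested neighbor loops.
--     hops = ([(x, y)], [], [], [])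
--     queue = [(x, y, 0)]
--     i = 0
--     while i < len(queue):
--         cx, cy, d = queue[i]
--         i += 1
--         if d >= 3:
--             continue
--         ns = [(cx + ox, cy + oy) for ox, oy in OFFSETS
--               if min_val <= cx + ox < max_val and min_val <= cy + oy < max_val]
--         hops[d + 1].extend(ns)
--         queue.extend((nx, ny, d + 1) for nx, ny in ns)
--     return hops
-- ===== Notes on version B (the rewrite author's own statement) =====
-- stated objective: alternative
-- what changed: Replaces A's three levels of hand-nested 8-neighbor loops by a single breadth-first worklist loop over a FIFO queue of (cell, depth) items, bucketing each generated in-bounds neighbor into the hop list for its depth.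
import Mathlib
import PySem

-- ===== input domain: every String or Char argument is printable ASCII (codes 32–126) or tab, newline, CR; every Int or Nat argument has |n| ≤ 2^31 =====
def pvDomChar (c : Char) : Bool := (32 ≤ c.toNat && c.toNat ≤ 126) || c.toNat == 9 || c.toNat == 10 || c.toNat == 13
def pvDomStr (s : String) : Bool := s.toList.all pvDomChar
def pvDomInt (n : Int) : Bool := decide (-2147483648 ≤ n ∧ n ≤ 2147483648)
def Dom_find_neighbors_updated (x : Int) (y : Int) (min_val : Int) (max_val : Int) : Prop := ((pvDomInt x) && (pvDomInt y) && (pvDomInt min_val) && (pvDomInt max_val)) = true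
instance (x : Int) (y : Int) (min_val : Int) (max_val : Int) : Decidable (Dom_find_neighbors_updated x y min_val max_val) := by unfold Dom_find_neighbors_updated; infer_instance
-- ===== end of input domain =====

-- B replaces A's three levels of hand-nested neighbor loops by a single
-- breadth-first worklist loop over a FIFO queue of (cell, depth) items (alternative).

-- ===== PORT A =====
-- Loop state is (one_hop, two_hop, three_hop); zero_hop is fixed to [(x, y)].
-- A's innermost dx3/dy3 double loop, appending in-bounds cells to three_hop.
def pvLoop3 (min_val max_val nx2 ny2 : Int)
    (s : List (Int × Int) × List (Int × Int) × List (Int × Int)) :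
    List (Int × Int) × List (Int × Int) × List (Int × Int) :=
  [-1, 0, 1].foldl (fun s (dx3 : Int) =>
    [-1, 0, 1].foldl (fun s (dy3 : Int) =>
      if dx3 = 0 ∧ dy3 = 0 then s
      else
        let nx3 := nx2 + dx3
        let ny3 := ny2 + dy3
        if nx3 < min_val ∨ nx3 ≥ max_val ∨ ny3 < min_val ∨ ny3 ≥ max_val then s
        else (s.1, s.2.1, s.2.2 ++ [(nx3, ny3)])) s) s

-- A's middle dx2/dy2 double loop: append to two_hop, then run the innermost loop.
def pvLoop2 (min_val max_val nx ny : Int)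
    (s : List (Int × Int) × List (Int × Int) × List (Int × Int)) :
    List (Int × Int) × List (Int × Int) × List (Int × Int) :=
  [-1, 0, 1].foldl (fun s (dx2 : Int) =>
    [-1, 0, 1].foldl (fun s (dy2 : Int) =>
      if dx2 = 0 ∧ dy2 = 0 then s
      else
        let nx2 := nx + dx2
        let ny2 := ny + dy2
        if nx2 < min_val ∨ nx2 ≥ max_val ∨ ny2 < min_val ∨ ny2 ≥ max_val then s
        else pvLoop3 min_val max_val nx2 ny2 (s.1, s.2.1 ++ [(nx2, ny2)], s.2.2)) s) s

-- A's outer dx/dy double loop: append to one_hop, then run the middle loop.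
def pvLoop1 (x y min_val max_val : Int)
    (s : List (Int × Int) × List (Int × Int) × List (Int × Int)) :
    List (Int × Int) × List (Int × Int) × List (Int × Int) :=
  [-1, 0, 1].foldl (fun s (dx : Int) =>
    [-1, 0, 1].foldl (fun s (dy : Int) =>
      if dx = 0 ∧ dy = 0 then s
      else
        let nx := x + dx
        let ny := y + dy
        if nx < min_val ∨ nx ≥ max_val ∨ ny < min_val ∨ ny ≥ max_val then s
        else pvLoop2 min_val max_val nx ny (s.1 ++ [(nx, ny)], s.2.1, s.2.2)) s) s

def find_neighbors_updated (x : Int) (y : Int) (min_val : Int) (max_val : Int) : (List (Int × Int)) × (List (Int × Int)) × (List (Int × Int)) × (List (Int × Int)) :=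
  let s := pvLoop1 x y min_val max_val ([], [], [])
  ([(x, y)], s.1, s.2.1, s.2.2)

-- ===== PORT B =====
-- Source B's module-level OFFSETS constant.
def pvOffsets : List (Int × Int) := [(-1, -1), (-1, 0), (-1, 1), (0, -1), (0, 1), (1, -1), (1, 0), (1, 1)]

-- Source B's `ns` comprehension: the in-bounds neighbors of (cx, cy), in OFFSETS order.
def pvNbrs (min_val max_val cx cy : Int) : List (Int × Int) :=
  pvOffsets.foldl (fun out o =>
    if min_val ≤ cx + o.1 ∧ cx + o.1 < max_val ∧ min_val ≤ cy + o.2 ∧ cy + o.2 < max_val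
    then out ++ [(cx + o.1, cy + o.2)] else out) []

-- weight of a queue item by depth, for termination of the worklist loop
def pvDepthW (d : Nat) : Nat := if 3 ≤ d then 1 else if d = 2 then 9 else if d = 1 then 73 else 585

def pvQW (q : List (Int × Int × Nat)) : Nat := (q.map (fun it => pvDepthW it.2.2)).sum

theorem pvNbrs_len (min_val max_val cx cy : Int) : (pvNbrs min_val max_val cx cy).length ≤ 8 := by
  have aux : ∀ (os : List (Int × Int)) (acc : List (Int × Int)),
      (os.foldl (fun out o =>
        if min_val ≤ cx + o.1 ∧ cx + o.1 < max_val ∧ min_val ≤ cy + o.2 ∧ cy + o.2 < max_val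
        then out ++ [(cx + o.1, cy + o.2)] else out) acc).length ≤ acc.length + os.length := by
    intro os
    induction os with
    | nil => simp
    | cons h t ih =>
      intro acc
      rw [List.foldl_cons]
      by_cases hc : min_val ≤ cx + h.1 ∧ cx + h.1 < max_val ∧ min_val ≤ cy + h.2 ∧ cy + h.2 < max_val
      · rw [if_pos hc]
        have h2 := ih (acc ++ [(cx + h.1, cy + h.2)])
        rw [List.length_append] at h2
        simp only [List.length_cons, List.length_nil] at h2 ⊢
        omega
      · rw [if_neg hc]
        have := ih acc
        simp only [List.length_cons]
        omega
  have h := aux pvOffsets []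
  simpa [pvNbrs] using h

theorem pvQW_map_const (l : List (Int × Int)) (d : Nat) :
    pvQW (l.map (fun p => (p.1, p.2, d))) = l.length * pvDepthW d := by
  induction l with
  | nil => simp [pvQW]
  | cons h t ih => simp_all [pvQW]; ring

-- Source B's while loop over the FIFO queue; the items at index ≥ i are the argument list.
def pvRun (min_val max_val : Int) (queue : List (Int × Int × Nat))
    (hops : List (Int × Int) × List (Int × Int) × List (Int × Int)) :
    List (Int × Int) × List (Int × Int) × List (Int × Int) :=
  match queue with
  | [] => hops
  | (cx, cy, d) :: rest =>
    if 3 ≤ d then pvRun min_val max_val rest hops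
    else
      let ns := pvNbrs min_val max_val cx cy
      let hops' := if d = 0 then (hops.1 ++ ns, hops.2.1, hops.2.2)
                   else if d = 1 then (hops.1, hops.2.1 ++ ns, hops.2.2)
                   else (hops.1, hops.2.1, hops.2.2 ++ ns)
      pvRun min_val max_val (rest ++ ns.map (fun p => (p.1, p.2, d + 1))) hops'
termination_by pvQW queue
decreasing_by
  · simp only [pvQW, List.map_cons, List.sum_cons]
    have : 1 ≤ pvDepthW d := by unfold pvDepthW; split_ifs <;> omega
    omega
  · rename_i hd
    simp only [pvQW, List.map_cons, List.sum_cons, List.map_append, List.sum_append]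
    have h1 : ((((pvNbrs min_val max_val cx cy).map (fun p => (p.1, p.2, d + 1))).map
        (fun it => pvDepthW it.2.2)).sum)
        = (pvNbrs min_val max_val cx cy).length * pvDepthW (d + 1) :=
      pvQW_map_const (pvNbrs min_val max_val cx cy) (d + 1)
    have h2 : (pvNbrs min_val max_val cx cy).length ≤ 8 := pvNbrs_len min_val max_val cx cy
    have h3 : 8 * pvDepthW (d + 1) < pvDepthW d := by
      unfold pvDepthW; split_ifs <;> omega
    have h4 : (pvNbrs min_val max_val cx cy).length * pvDepthW (d + 1)
        ≤ 8 * pvDepthW (d + 1) := Nat.mul_le_mul_right _ h2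
    simp only [h1]
    omega

def find_neighbors_updated_alt (x : Int) (y : Int) (min_val : Int) (max_val : Int) : (List (Int × Int)) × (List (Int × Int)) × (List (Int × Int)) × (List (Int × Int)) :=
  let s := pvRun min_val max_val [(x, y, 0)] ([], [], [])
  ([(x, y)], s.1, s.2.1, s.2.2)

-- ===== PRECONDITION & SPEC =====
def Spec_find_neighbors_updated (x : Int) (y : Int) (min_val : Int) (max_val : Int) (out : (List (Int × Int)) × (List (Int × Int)) × (List (Int × Int)) × (List (Int × Int))) : Prop := out = find_neighbors_updated_alt x y min_val max_val
instance (x : Int) (y : Int) (min_val : Int) (max_val : Int) (out : (List (Int × Int)) × (List (Int × Int)) × (List (Int × Int)) × (List (Int × Int))) : Decidable (Spec_find_neighbors_updated x y min_val max_val out) := by unfold Spec_find_neighbors_updated; infer_instance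

-- ===== CLAIM (what is proved, stated in full; the proofs are below) =====
def Claim_equal_find_neighbors_updated : Prop := ∀ (x : Int) (y : Int) (min_val : Int) (max_val : Int), Dom_find_neighbors_updated x y min_val max_val → Spec_find_neighbors_updated x y min_val max_val (find_neighbors_updated x y min_val max_val)

-- ===== LEMMAS AND PROOFS =====

-- one candidate cell, emitted iff in bounds
def pvEmit (min_val max_val a b : Int) : List (Int × Int) :=
  if min_val ≤ a ∧ a < max_val ∧ min_val ≤ b ∧ b < max_val then [(a, b)] else []

theorem stepB_eq (min_val max_val a b : Int) (out : List (Int × Int)) :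
    (if min_val ≤ a ∧ a < max_val ∧ min_val ≤ b ∧ b < max_val then out ++ [(a, b)] else out)
    = out ++ pvEmit min_val max_val a b := by
  unfold pvEmit; split_ifs <;> simp

theorem nbrs_eq (min_val max_val cx cy : Int) :
    pvNbrs min_val max_val cx cy =
      pvEmit min_val max_val (cx + -1) (cy + -1) ++ pvEmit min_val max_val (cx + -1) (cy + 0) ++
      pvEmit min_val max_val (cx + -1) (cy + 1) ++ pvEmit min_val max_val (cx + 0) (cy + -1) ++
      pvEmit min_val max_val (cx + 0) (cy + 1) ++ pvEmit min_val max_val (cx + 1) (cy + -1) ++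
      pvEmit min_val max_val (cx + 1) (cy + 0) ++ pvEmit min_val max_val (cx + 1) (cy + 1) := by
  simp only [pvNbrs, pvOffsets, List.foldl_cons, List.foldl_nil, stepB_eq, List.nil_append]

theorem step3_eq (min_val max_val a b : Int)
    (s : List (Int × Int) × List (Int × Int) × List (Int × Int)) :
    (if a < min_val ∨ a ≥ max_val ∨ b < min_val ∨ b ≥ max_val then s
     else (s.1, s.2.1, s.2.2 ++ [(a, b)]))
    = (s.1, s.2.1, s.2.2 ++ pvEmit min_val max_val a b) := by
  unfold pvEmit
  split_ifs with h1 h2 <;> simp_all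
  omega

theorem loop3_eq (min_val max_val nx2 ny2 : Int)
    (s : List (Int × Int) × List (Int × Int) × List (Int × Int)) :
    pvLoop3 min_val max_val nx2 ny2 s
    = (s.1, s.2.1, s.2.2 ++ pvNbrs min_val max_val nx2 ny2) := by
  simp only [pvLoop3, List.foldl_cons, List.foldl_nil, Int.reduceEq, and_self, and_false,
    false_and, if_true, if_false, step3_eq, nbrs_eq, List.append_assoc]

theorem step2_eq (min_val max_val a b : Int)
    (s : List (Int × Int) × List (Int × Int) × List (Int × Int)) :
    (if a < min_val ∨ a ≥ max_val ∨ b < min_val ∨ b ≥ max_val then s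
     else pvLoop3 min_val max_val a b (s.1, s.2.1 ++ [(a, b)], s.2.2))
    = (s.1, s.2.1 ++ pvEmit min_val max_val a b,
       s.2.2 ++ (pvEmit min_val max_val a b).flatMap (fun p => pvNbrs min_val max_val p.1 p.2)) := by
  rw [loop3_eq]; unfold pvEmit
  split_ifs with h1 h2 <;> simp_all
  omega

theorem loop2_eq (min_val max_val nx ny : Int)
    (s : List (Int × Int) × List (Int × Int) × List (Int × Int)) :
    pvLoop2 min_val max_val nx ny s
    = (s.1, s.2.1 ++ pvNbrs min_val max_val nx ny,
       s.2.2 ++ (pvNbrs min_val max_val nx ny).flatMap (fun p => pvNbrs min_val max_val p.1 p.2)) := by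
  simp only [pvLoop2, List.foldl_cons, List.foldl_nil, Int.reduceEq, and_self, and_false,
    false_and, if_true, if_false, step2_eq, nbrs_eq, List.flatMap_append,
    List.append_assoc]

theorem step1_eq (min_val max_val a b : Int)
    (s : List (Int × Int) × List (Int × Int) × List (Int × Int)) :
    (if a < min_val ∨ a ≥ max_val ∨ b < min_val ∨ b ≥ max_val then s
     else pvLoop2 min_val max_val a b (s.1 ++ [(a, b)], s.2.1, s.2.2))
    = (s.1 ++ pvEmit min_val max_val a b,
       s.2.1 ++ (pvEmit min_val max_val a b).flatMap (fun p => pvNbrs min_val max_val p.1 p.2),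
       s.2.2 ++ (pvEmit min_val max_val a b).flatMap
         (fun p => (pvNbrs min_val max_val p.1 p.2).flatMap (fun q => pvNbrs min_val max_val q.1 q.2))) := by
  rw [loop2_eq]; unfold pvEmit
  split_ifs with h1 h2 <;> simp_all
  omega

theorem loop1_eq (x y min_val max_val : Int)
    (s : List (Int × Int) × List (Int × Int) × List (Int × Int)) :
    pvLoop1 x y min_val max_val s
    = (s.1 ++ pvNbrs min_val max_val x y,
       s.2.1 ++ (pvNbrs min_val max_val x y).flatMap (fun p => pvNbrs min_val max_val p.1 p.2),
       s.2.2 ++ ((pvNbrs min_val max_val x y).flatMap (fun p => pvNbrs min_val max_val p.1 p.2)).flatMap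
         (fun q => pvNbrs min_val max_val q.1 q.2)) := by
  simp only [pvLoop1, List.foldl_cons, List.foldl_nil, Int.reduceEq, and_self, and_false,
    false_and, if_true, if_false, step1_eq, List.flatMap_assoc, nbrs_eq,
    List.flatMap_append, List.append_assoc]

-- ---- B-side characterization of the worklist loop ----

theorem run_depth3 (min_val max_val : Int) (q : List (Int × Int × Nat))
    (hq : ∀ it ∈ q, 3 ≤ it.2.2) (acc : List (Int × Int) × List (Int × Int) × List (Int × Int)) :
    pvRun min_val max_val q acc = acc := by
  induction q with
  | nil => simp [pvRun]
  | cons h t ih =>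
    obtain ⟨cx, cy, d⟩ := h
    have hd : 3 ≤ d := hq _ (List.mem_cons_self)
    rw [pvRun]
    simp only [hd, if_true]
    exact ih (fun it hit => hq it (List.mem_cons_of_mem _ hit))

theorem run_depth2 (min_val max_val : Int) (q2 : List (Int × Int))
    (q3 : List (Int × Int × Nat)) (hq3 : ∀ it ∈ q3, 3 ≤ it.2.2)
    (acc : List (Int × Int) × List (Int × Int) × List (Int × Int)) :
    pvRun min_val max_val (q2.map (fun p => (p.1, p.2, 2)) ++ q3) acc
    = (acc.1, acc.2.1, acc.2.2 ++ q2.flatMap (fun p => pvNbrs min_val max_val p.1 p.2)) := by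
  induction q2 generalizing q3 acc with
  | nil => simp [run_depth3 min_val max_val q3 hq3]
  | cons c t ih =>
    simp only [List.map_cons, List.cons_append]
    rw [pvRun]
    simp only [show ¬ (3 ≤ 2) by omega, if_false, show (2 : Nat) ≠ 0 by omega,
      show (2 : Nat) ≠ 1 by omega]
    rw [List.append_assoc]
    rw [ih (q3 ++ (pvNbrs min_val max_val c.1 c.2).map (fun p => (p.1, p.2, 2 + 1)))
      (by intro it hit
          rcases List.mem_append.mp hit with h | h
          · exact hq3 it h
          · obtain ⟨p, _, rfl⟩ := List.mem_map.mp h; exact Nat.le_refl 3)]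
    simp [List.append_assoc]

theorem run_depth1 (min_val max_val : Int) (q1 q2 : List (Int × Int))
    (acc : List (Int × Int) × List (Int × Int) × List (Int × Int)) :
    pvRun min_val max_val (q1.map (fun p => (p.1, p.2, 1)) ++ q2.map (fun p => (p.1, p.2, 2))) acc
    = (acc.1,
       acc.2.1 ++ q1.flatMap (fun p => pvNbrs min_val max_val p.1 p.2),
       acc.2.2 ++ (q2 ++ q1.flatMap (fun p => pvNbrs min_val max_val p.1 p.2)).flatMap
         (fun p => pvNbrs min_val max_val p.1 p.2)) := by
  induction q1 generalizing q2 acc with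
  | nil =>
    simp only [List.map_nil, List.nil_append, List.flatMap_nil, List.append_nil]
    simpa using run_depth2 min_val max_val q2 [] (by simp) acc
  | cons c t ih =>
    simp only [List.map_cons, List.cons_append]
    rw [pvRun]
    simp only [show ¬ (3 ≤ 1) by omega, if_false, show (1 : Nat) ≠ 0 by omega, if_true]
    rw [List.append_assoc, show ((pvNbrs min_val max_val c.1 c.2).map (fun p => (p.1, p.2, 1 + 1)))
        = ((pvNbrs min_val max_val c.1 c.2).map (fun p => (p.1, p.2, 2))) from rfl,
      ← List.map_append, ih (q2 ++ pvNbrs min_val max_val c.1 c.2) _]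
    simp [List.flatMap_append, List.append_assoc]

-- ===== VERDICT (by name: the statement is the Claim_ definition above) =====
theorem find_neighbors_updated_spec : Claim_equal_find_neighbors_updated := by
  intro x y min_val max_val _
  show _ = _
  simp only [find_neighbors_updated, find_neighbors_updated_alt, loop1_eq, List.nil_append]
  rw [pvRun]
  simp only [show ¬ (3 ≤ 0) by omega, if_false, reduceIte, List.nil_append, Nat.reduceAdd]
  have h := run_depth1 min_val max_val (pvNbrs min_val max_val x y) []
      ((pvNbrs min_val max_val x y, [], []))
  simp only [List.map_nil, List.append_nil, List.nil_append] at h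
  rw [h]
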